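-- pv_equiv track=rewrite | github.com/sstromw/BetweenTwoCities | b2c.py | score_taverns
-- ===== SOURCE A (Python) =====
-- def score_taverns(city):
--   score = 0
--   tavern_scores = [0,1,4,9,17]
--   tiles_scored = [False]*16
--
--   j = 1
--   while j > 0:
--     s = ''
--     j = 0
--     for i in range(16):
--       if city[i] in '1234' and city[i] not in s and not tiles_scored[i]:
--         tiles_scored[i] = True
--         s += city[i]
--         j += 1
--     score += tavern_scores[j]
--
--   return score
-- ===== SOURCE B (Python) =====
-- def score_taverns(city):
--   counts = {}
--   for i in range(16):
--     c = city[i]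
--     if c in '1234':
--       counts[c] = counts.get(c, 0) + 1
--   score = 0
--   r = 1
--   while True:
--     j = sum(1 for c in '1234' if counts.get(c, 0) >= r)
--     if j == 0:
--       return score
--     score += (0, 1, 4, 9, 17)[j]
--     r += 1
-- ===== Notes on version B (the rewrite author's own statement) =====
-- stated objective: simpler
-- what changed: Replaces A's repeated marking passes over the 16 tiles (tiles_scored bookkeeping, rescanning all tiles until a pass marks nothing) with a single frequency count of the four tavern types followed by a per-level summation over the counts.
import Mathlib
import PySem

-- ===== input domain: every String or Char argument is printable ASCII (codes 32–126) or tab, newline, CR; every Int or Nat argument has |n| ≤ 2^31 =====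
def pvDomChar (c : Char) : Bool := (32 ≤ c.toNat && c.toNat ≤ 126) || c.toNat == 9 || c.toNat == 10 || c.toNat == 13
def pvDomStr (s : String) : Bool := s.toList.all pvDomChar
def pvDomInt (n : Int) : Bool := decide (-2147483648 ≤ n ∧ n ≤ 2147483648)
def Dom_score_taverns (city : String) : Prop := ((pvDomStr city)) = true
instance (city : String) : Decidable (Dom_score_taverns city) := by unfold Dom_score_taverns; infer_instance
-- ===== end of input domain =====

-- B replaces A's repeated marking passes over the 16 tiles with one frequency
-- count of the tavern types followed by a per-level summation (objective: simpler).

-- ===== PORT A =====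
-- one inner 'for i in range(16)' pass of A; state = (s, j, tiles_scored)
def pvStepA (cs : List Char) (st : List Char × Int × List Bool) (i : Int) :
    List Char × Int × List Bool :=
  let c := PySem.List.pyGetD cs i ' '   -- city[i]; exact under Pre_ (16 ≤ length)
  if c ∈ "1234".toList ∧ c ∉ st.1 ∧ PySem.List.pyGetD st.2.2 i false = false then
    (st.1 ++ [c], st.2.1 + 1, PySem.List.pySetD st.2.2 i true)
  else st

def pvPassA (cs : List Char) (tiles : List Bool) : List Char × Int × List Bool :=
  (PySem.List.pyRange 0 16 1).foldl (pvStepA cs) ([], 0, tiles)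

-- the 'while j > 0' loop; fuel 17 always suffices: every iteration with j > 0
-- marks at least one of the 16 tiles, so at most 16 such iterations occur
-- before the final j = 0 iteration.
def pvOuterA (cs : List Char) : Nat → Int → List Bool → Int
  | 0, score, _ => score
  | f + 1, score, tiles =>
    let r := pvPassA cs tiles
    let score' := score + PySem.List.pyGetD [0, 1, 4, 9, 17] r.2.1 0
    if r.2.1 > 0 then pvOuterA cs f score' r.2.2 else score'

def score_taverns (city : String) : Int :=
  pvOuterA city.toList 17 0 (List.replicate 16 false)

-- ===== PORT B =====
-- counts[c] = counts.get(c, 0) + 1 over the first 16 tiles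
def pvCountsB (cs : List Char) : PySem.Dict Char Int :=
  (PySem.List.pyRange 0 16 1).foldl
    (fun d i =>
      let c := PySem.List.pyGetD cs i ' '   -- city[i]; exact under Pre_
      if c ∈ "1234".toList then d.insert c (d.getD c 0 + 1) else d)
    PySem.Dict.empty

-- the 'while True' level loop; fuel 17 always suffices: every count is at most
-- 16, so level r = 17 (or an earlier one) yields j = 0 and returns.
def pvLevelsB (counts : PySem.Dict Char Int) : Nat → Int → Int → Int
  | 0, _, score => score
  | f + 1, r, score =>
    let j : Int := (("1234".toList).countP (fun c => decide (r ≤ counts.getD c 0)) : Nat)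
    if j = 0 then score
    else pvLevelsB counts f (r + 1) (score + PySem.List.pyGetD [0, 1, 4, 9, 17] j 0)

def score_taverns_alt (city : String) : Int :=
  pvLevelsB (pvCountsB city.toList) 17 1 0

-- ===== PRECONDITION & SPEC =====
-- Python A raises IndexError exactly when len(city) < 16 (city[i] for i in range(16)); B raises there too.
-- Inside Pre_, e.g.: "1234123412341234", "11x2 33y4 1.2.3!", "abcdefgh12341234", "4321432143214321"
-- and also: "1111222233334444", "!!!!!!!!!!!!1234", "x1x2x3x4x1x2x3x4", "   121212121212  "
def Pre_score_taverns (city : String) : Prop := 16 ≤ city.toList.length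
-- i.e. the city has at least the 16 scored tiles, like the reference city "1234123412341234"
instance (city : String) : Decidable (Pre_score_taverns city) := by
  unfold Pre_score_taverns; infer_instance

def pvWitness_score_taverns : String := "1213x4 11..2334!"

def Spec_score_taverns (city : String) (out : Int) : Prop := out = score_taverns_alt city
instance (city : String) (out : Int) : Decidable (Spec_score_taverns city out) := by
  unfold Spec_score_taverns; infer_instance

-- ===== CLAIM (what is proved, stated in full; the proofs are below) =====
def Claim_equal_score_taverns : Prop := ∀ (city : String), Dom_score_taverns city →
  Pre_score_taverns city → Spec_score_taverns city (score_taverns city)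

-- ===== LEMMAS AND PROOFS =====

def pvTypes : List Char := "1234".toList
def pvDget (cs : List Char) (p : Nat) : Char := PySem.List.pyGetD cs (p : Int) ' '
def pvPfx (cs : List Char) (i : Nat) : List Char := (List.range i).map (pvDget cs)
def pvCnt (cs : List Char) (i : Nat) (c : Char) : Nat := (pvPfx cs i).count c
def pvTilesAt (cs : List Char) (k : Nat) : List Bool :=
  (List.range 16).map (fun p =>
    decide (pvDget cs p ∈ pvTypes ∧ pvCnt cs p (pvDget cs p) + 1 < k))
def pvMidTiles (cs : List Char) (k i : Nat) : List Bool :=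
  (List.range 16).map (fun p =>
    decide (pvDget cs p ∈ pvTypes ∧
      pvCnt cs p (pvDget cs p) + 1 < (if p < i then k + 1 else k)))
def pvJ (cs : List Char) (k : Nat) : Nat :=
  (pvTypes.filter (fun c => decide (k ≤ pvCnt cs 16 c))).length

lemma pvPfx_succ (cs : List Char) (i : Nat) :
    pvPfx cs (i + 1) = pvPfx cs i ++ [pvDget cs i] := by
  simp [pvPfx, List.range_succ]

lemma pvCnt_succ (cs : List Char) (i : Nat) (c : Char) :
    pvCnt cs (i + 1) c = pvCnt cs i c + (if pvDget cs i = c then 1 else 0) := by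
  simp [pvCnt, pvPfx_succ, List.count_append, List.count_singleton]

lemma pvTilesAt_one (cs : List Char) : pvTilesAt cs 1 = List.replicate 16 false := by
  simp [pvTilesAt]

lemma pvMid_zero (cs : List Char) (k : Nat) : pvMidTiles cs k 0 = pvTilesAt cs k := by
  simp [pvMidTiles, pvTilesAt]

lemma pvMid_full (cs : List Char) (k : Nat) : pvMidTiles cs k 16 = pvTilesAt cs (k + 1) := by
  unfold pvMidTiles pvTilesAt
  apply List.map_congr_left
  intro p hp
  simp only [List.mem_range] at hp
  simp [hp]

lemma pvMid_getD (cs : List Char) (k i : Nat) (h : i < 16) :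
    (pvMidTiles cs k i).getD i false =
      decide (pvDget cs i ∈ pvTypes ∧ pvCnt cs i (pvDget cs i) + 1 < k) := by
  simp [pvMidTiles, List.getD_eq_getElem?_getD, h]

lemma pvMid_len (cs : List Char) (k i : Nat) : (pvMidTiles cs k i).length = 16 := by
  simp [pvMidTiles]

lemma pvMid_step_eq (cs : List Char) (k i : Nat)
    (h : ¬ (pvDget cs i ∈ pvTypes ∧ pvCnt cs i (pvDget cs i) + 1 = k)) :
    pvMidTiles cs k i = pvMidTiles cs k (i + 1) := by
  unfold pvMidTiles
  apply List.map_congr_left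
  intro p hp
  simp only [List.mem_range] at hp
  by_cases hpi : p = i
  · subst hpi
    rw [decide_eq_decide]
    by_cases hA : pvDget cs p ∈ pvTypes
    · have hne : pvCnt cs p (pvDget cs p) + 1 ≠ k := fun hh => h ⟨hA, hh⟩
      constructor
      · rintro ⟨h1, h2⟩; exact ⟨h1, by split_ifs at h2 ⊢ <;> omega⟩
      · rintro ⟨h1, h2⟩; exact ⟨h1, by split_ifs at h2 ⊢ <;> omega⟩
    · constructor <;> (rintro ⟨h1, _⟩; exact absurd h1 hA)
  · have hiff : p < i ↔ p < i + 1 := by omega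
    simp [hiff]

lemma pvMid_step_set (cs : List Char) (k i : Nat)
    (hA : pvDget cs i ∈ pvTypes) (hk : pvCnt cs i (pvDget cs i) + 1 = k) :
    (pvMidTiles cs k i).set i true = pvMidTiles cs k (i + 1) := by
  apply List.ext_getElem (by simp [pvMid_len])
  intro p h1 h2
  rw [List.getElem_set]
  by_cases hpi : i = p
  · subst hpi
    rw [if_pos rfl]
    simp only [pvMidTiles, List.getElem_map, List.getElem_range]
    exact (decide_eq_true ⟨hA, by split_ifs <;> omega⟩).symm
  · rw [if_neg hpi]
    simp only [pvMidTiles, List.getElem_map, List.getElem_range]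
    have hiff : (List.range 16)[p] < i ↔ (List.range 16)[p] < i + 1 := by
      simp only [List.getElem_range]
      omega
    simp only [List.getElem_range] at hiff ⊢
    rw [decide_eq_decide]
    constructor
    · rintro ⟨u, v⟩; exact ⟨u, by split_ifs at v ⊢ <;> omega⟩
    · rintro ⟨u, v⟩; exact ⟨u, by split_ifs at v ⊢ <;> omega⟩

lemma pvPass_fold (cs : List Char) (k : Nat) (hk : 1 ≤ k) :
    ∀ i, i ≤ 16 → ∃ s : List Char, s.Nodup ∧
      (∀ c, c ∈ s ↔ c ∈ pvTypes ∧ k ≤ pvCnt cs i c) ∧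
      (PySem.List.pyRange 0 (i : Int) 1).foldl (pvStepA cs) ([], 0, pvTilesAt cs k)
        = (s, (s.length : Int), pvMidTiles cs k i) := by
  intro i
  induction i with
  | zero =>
    intro _
    refine ⟨[], List.nodup_nil, ?_, ?_⟩
    · intro c
      have hc0 : pvCnt cs 0 c = 0 := by simp [pvCnt, pvPfx]
      constructor
      · intro h; exact absurd h (List.not_mem_nil)
      · rintro ⟨_, h⟩; omega
    · rw [show ((0 : Nat) : Int) = 0 from rfl, PySem.List.pyRange_one_eq_nil (by omega)]
      simp [pvMid_zero]
  | succ i ih =>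
    intro hi
    obtain ⟨s, hnd, hmem, hfold⟩ := ih (by omega)
    have hi16 : i < 16 := by omega
    have hsplit : PySem.List.pyRange 0 ((i + 1 : Nat) : Int) 1
        = PySem.List.pyRange 0 (i : Int) 1 ++ [(i : Int)] := by
      push_cast
      rw [PySem.List.pyRange_one_succ_right (by positivity)]
    rw [hsplit, List.foldl_append, hfold]
    simp only [List.foldl_cons, List.foldl_nil]
    unfold pvStepA
    rw [show "1234".toList = pvTypes from rfl]
    have hget : PySem.List.pyGetD cs (i : Int) ' ' = pvDget cs i := rfl
    have hgetm : PySem.List.pyGetD (pvMidTiles cs k i) (i : Int) false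
        = decide (pvDget cs i ∈ pvTypes ∧ pvCnt cs i (pvDget cs i) + 1 < k) := by
      rw [PySem.List.pyGetD_natCast, pvMid_getD cs k i hi16]
    have hsetm : PySem.List.pySetD (pvMidTiles cs k i) (i : Int) true
        = (pvMidTiles cs k i).set i true := by
      unfold PySem.List.pySetD
      rw [PySem.List.pySet?_natCast (pvMidTiles cs k i) i true (by rw [pvMid_len]; omega)]
      rfl
    simp only [hget, hgetm, hsetm]
    by_cases hA : pvDget cs i ∈ pvTypes
    · by_cases hmk : pvCnt cs i (pvDget cs i) + 1 = k
      · -- MARK: the first not-yet-scored occurrence of this type in this pass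
        have hcs : pvDget cs i ∉ s := by
          rw [hmem]; rintro ⟨_, hle⟩; omega
        have hbit : decide (pvDget cs i ∈ pvTypes ∧ pvCnt cs i (pvDget cs i) + 1 < k)
            = false := by
          rw [decide_eq_false_iff_not]; rintro ⟨_, hlt⟩; omega
        rw [if_pos ⟨hA, hcs, hbit⟩]
        have hndc : (s ++ [pvDget cs i]).Nodup := by
          refine hnd.append (by simp) ?_
          intro a ha hb
          rw [List.mem_singleton] at hb
          subst hb; exact hcs ha
        refine ⟨s ++ [pvDget cs i], hndc, ?_, ?_⟩
        · intro c'
          rw [List.mem_append, List.mem_singleton, pvCnt_succ]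
          by_cases hce : pvDget cs i = c'
          · subst hce
            rw [if_pos rfl]
            constructor
            · intro _; exact ⟨hA, by omega⟩
            · intro _; exact Or.inr rfl
          · rw [if_neg hce, Nat.add_zero]
            constructor
            · rintro (h | h)
              · exact (hmem c').mp h
              · exact absurd h.symm hce
            · intro h; exact Or.inl ((hmem c').mpr h)
        · rw [pvMid_step_set cs k i hA hmk]
          simp only [Prod.mk.injEq]
          exact ⟨trivial, by simp, trivial⟩
      · -- NO MARK: this type was either already taken this pass or already scored
        have hcond : ¬ (pvDget cs i ∈ pvTypes ∧ pvDget cs i ∉ s ∧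
            decide (pvDget cs i ∈ pvTypes ∧ pvCnt cs i (pvDget cs i) + 1 < k) = false) := by
          rintro ⟨_, hcs, hbit⟩
          rw [decide_eq_false_iff_not] at hbit
          have h1 : k ≤ pvCnt cs i (pvDget cs i) := by
            have h2 : ¬ (pvCnt cs i (pvDget cs i) + 1 < k) := fun hh => hbit ⟨hA, hh⟩
            omega
          exact hcs ((hmem _).mpr ⟨hA, h1⟩)
        rw [if_neg hcond]
        refine ⟨s, hnd, ?_, ?_⟩
        · intro c'
          rw [pvCnt_succ]
          by_cases hce : pvDget cs i = c'
          · subst hce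
            rw [if_pos rfl, hmem _]
            constructor
            · rintro ⟨_, h⟩; exact ⟨hA, by omega⟩
            · rintro ⟨_, h⟩; exact ⟨hA, by omega⟩
          · rw [if_neg hce, Nat.add_zero, hmem c']
        · rw [pvMid_step_eq cs k i (fun hh => hmk hh.2)]
    · have hcond : ¬ (pvDget cs i ∈ pvTypes ∧ pvDget cs i ∉ s ∧
          decide (pvDget cs i ∈ pvTypes ∧ pvCnt cs i (pvDget cs i) + 1 < k) = false) := by
        rintro ⟨h1, _⟩; exact hA h1
      rw [if_neg hcond]
      refine ⟨s, hnd, ?_, ?_⟩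
      · intro c'
        rw [pvCnt_succ]
        by_cases hce : pvDget cs i = c'
        · rw [if_pos hce, hmem c']
          constructor
          · rintro ⟨h1, _⟩; exact absurd (hce ▸ h1) hA
          · rintro ⟨h1, _⟩; exact absurd (hce ▸ h1) hA
        · rw [if_neg hce, Nat.add_zero, hmem c']
      · rw [pvMid_step_eq cs k i (fun hh => hA hh.1)]

lemma pvPassA_eq (cs : List Char) (k : Nat) (hk : 1 ≤ k) :
    ∃ s, pvPassA cs (pvTilesAt cs k) = (s, (pvJ cs k : Int), pvTilesAt cs (k + 1)) := by
  obtain ⟨s, hnd, hmem, hfold⟩ := pvPass_fold cs k hk 16 (by omega)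
  refine ⟨s, ?_⟩
  have h16 : ((16 : Nat) : Int) = (16 : Int) := by norm_num
  unfold pvPassA
  rw [← h16, hfold, pvMid_full]
  have hperm : s.Perm (pvTypes.filter (fun c => decide (k ≤ pvCnt cs 16 c))) := by
    rw [List.perm_ext_iff_of_nodup hnd (List.Nodup.filter _ (by decide))]
    intro c
    rw [hmem c, List.mem_filter]
    simp
  rw [show pvJ cs k = s.length from (hperm.length_eq).symm]

def pvCStep (cs : List Char) (d : PySem.Dict Char Int) (j : Int) : PySem.Dict Char Int :=
  if PySem.List.pyGetD cs j ' ' ∈ pvTypes then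
    d.insert (PySem.List.pyGetD cs j ' ') (d.getD (PySem.List.pyGetD cs j ' ') 0 + 1)
  else d

lemma pvCountsB_eq (cs : List Char) :
    pvCountsB cs = (PySem.List.pyRange 0 16 1).foldl (pvCStep cs) PySem.Dict.empty := rfl

lemma pvCounts_fold (cs : List Char) :
    ∀ (i : Nat), ∀ c ∈ pvTypes,
      ((PySem.List.pyRange 0 (i : Int) 1).foldl (pvCStep cs) PySem.Dict.empty).getD c 0
        = (pvCnt cs i c : Int) := by
  intro i
  induction i with
  | zero =>
    intro c _
    rw [show ((0 : Nat) : Int) = 0 from rfl, PySem.List.pyRange_one_eq_nil (by omega)]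
    simp [pvCnt, pvPfx, PySem.Dict.getD_empty]
  | succ i ih =>
    intro c hcmem
    have hsplit : PySem.List.pyRange 0 ((i + 1 : Nat) : Int) 1
        = PySem.List.pyRange 0 (i : Int) 1 ++ [(i : Int)] := by
      push_cast
      rw [PySem.List.pyRange_one_succ_right (by positivity)]
    rw [hsplit, List.foldl_append]
    simp only [List.foldl_cons, List.foldl_nil]
    set d0 : PySem.Dict Char Int :=
      (PySem.List.pyRange 0 (i : Int) 1).foldl (pvCStep cs) PySem.Dict.empty with hd0
    unfold pvCStep
    have hget : PySem.List.pyGetD cs (i : Int) ' ' = pvDget cs i := rfl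
    rw [hget]
    by_cases h : pvDget cs i ∈ pvTypes
    · rw [if_pos h, PySem.Dict.getD_insert]
      by_cases hce : c = pvDget cs i
      · rw [if_pos hce, hce, ih _ h, pvCnt_succ]
        rw [if_pos rfl]
        push_cast
        ring
      · rw [if_neg hce, ih c hcmem, pvCnt_succ]
        rw [if_neg (fun hh => hce hh.symm), Nat.add_zero]
    · rw [if_neg h, ih c hcmem, pvCnt_succ]
      have hne : ¬ (pvDget cs i = c) := fun hh => h (hh ▸ hcmem)
      rw [if_neg hne, Nat.add_zero]

lemma pvCounts_getD (cs : List Char) (c : Char) (hc : c ∈ pvTypes) :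
    (pvCountsB cs).getD c 0 = (pvCnt cs 16 c : Int) := by
  have h := pvCounts_fold cs 16 c hc
  have h16 : ((16 : Nat) : Int) = (16 : Int) := by norm_num
  rw [h16] at h
  rw [pvCountsB_eq]
  exact h

lemma pvCountP_eq (cs : List Char) (k : Nat) :
    (("1234".toList).countP (fun c => decide ((k : Int) ≤ (pvCountsB cs).getD c 0)))
      = pvJ cs k := by
  rw [show "1234".toList = pvTypes from rfl, pvJ, List.countP_eq_length_filter]
  congr 1
  apply List.filter_congr
  intro c hcmem
  rw [pvCounts_getD cs c hcmem, decide_eq_decide, Nat.cast_le]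

lemma pvLoops_eq (cs : List Char) :
    ∀ f (k : Nat) (score : Int), 1 ≤ k →
      pvOuterA cs f score (pvTilesAt cs k)
        = pvLevelsB (pvCountsB cs) f (k : Int) score := by
  intro f
  induction f with
  | zero => intros; rfl
  | succ f ih =>
    intro k score hk
    obtain ⟨s, hs⟩ := pvPassA_eq cs k hk
    rw [pvOuterA, pvLevelsB, hs, pvCountP_eq cs k]
    by_cases hJ : pvJ cs k = 0
    · rw [hJ]
      simp
    · have hpos : (0 : Int) < ((pvJ cs k : Nat) : Int) := by
        exact_mod_cast Nat.pos_of_ne_zero hJ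
      have hne : ¬ (((pvJ cs k : Nat) : Int) = 0) := by omega
      rw [if_pos hpos, if_neg hne]
      have hcast : ((k + 1 : Nat) : Int) = (k : Int) + 1 := by push_cast; ring
      rw [← hcast]
      exact ih (k + 1) _ (by omega)


-- ===== VERDICT (by name: the statement is the Claim_ definition above) =====
theorem score_taverns_spec : Claim_equal_score_taverns := by
  intro city _ _
  unfold Spec_score_taverns score_taverns score_taverns_alt
  rw [← pvTilesAt_one city.toList]
  simpa using pvLoops_eq city.toList 17 1 0 (by omega)
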